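-- pv_equiv track=rewrite | github.com/himais0giiiin/edbb-runner | edbb-runner.py | _module_install_candidates
-- ===== SOURCE A (Python) =====
-- MODULE_PACKAGE_MAP = {
--     "discord": "discord.py[voice]",
--     "cv2": "opencv-python",
--     "PIL": "Pillow",
--     "yaml": "PyYAML",
--     "dotenv": "python-dotenv",
--     "bs4": "beautifulsoup4",
--     "sklearn": "scikit-learn",
--     "Crypto": "pycryptodome",
--     "OpenSSL": "pyopenssl",
--     "dateutil": "python-dateutil",
--     "google.generativeai": "google-generativeai",
--     "google.genai": "google-genai",
--     "aiohttp": "aiohttp",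
--     "requests": "requests",
-- }
--
-- def _module_install_candidates(module_name):
--     root = module_name.split(".", 1)[0]
--     candidates = []
--
--     for key in (module_name, root):
--         mapped = MODULE_PACKAGE_MAP.get(key)
--         if mapped and mapped not in candidates:
--             candidates.append(mapped)
--
--     fallback_root = root.replace("_", "-").lower()
--     if fallback_root and fallback_root not in candidates:
--         candidates.append(fallback_root)
--
--     fallback_full = module_name.replace("_", "-").replace(".", "-").lower()
--     if fallback_full and fallback_full not in candidates:
--         candidates.append(fallback_full)
--
--     return candidates
-- ===== SOURCE B (Python) =====
-- MODULE_PACKAGE_MAP = {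
--     "discord": "discord.py[voice]",
--     "cv2": "opencv-python",
--     "PIL": "Pillow",
--     "yaml": "PyYAML",
--     "dotenv": "python-dotenv",
--     "bs4": "beautifulsoup4",
--     "sklearn": "scikit-learn",
--     "Crypto": "pycryptodome",
--     "OpenSSL": "pyopenssl",
--     "dateutil": "python-dateutil",
--     "google.generativeai": "google-generativeai",
--     "google.genai": "google-genai",
--     "aiohttp": "aiohttp",
--     "requests": "requests",
-- }
--
--
-- def _first_distinct(values):
--     # Recursive first-occurrence selection: take the head, then recurse on the
--     # tail with every later copy of the head filtered out.
--     if not values: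
--         return []
--     head, tail = values[0], values[1:]
--     if not head:
--         return _first_distinct(tail)
--     return [head] + _first_distinct([v for v in tail if v != head])
--
--
-- def _module_install_candidates(module_name):
--     root = module_name.split(".", 1)[0]
--     raw = [
--         MODULE_PACKAGE_MAP.get(module_name),
--         MODULE_PACKAGE_MAP.get(root),
--         root.replace("_", "-").lower(),
--         module_name.replace("_", "-").replace(".", "-").lower(),
--     ]
--     return _first_distinct(raw)
-- ===== Notes on version B (the rewrite author's own statement) =====
-- stated objective: alternative
-- what changed: B computes the four candidate values up front and selects first occurrences by a recursive take-head-then-filter-duplicates-out-of-the-tail pass, instead of A's four interleaved compute/membership-check/append blocks against the growing output list.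
import Mathlib
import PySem

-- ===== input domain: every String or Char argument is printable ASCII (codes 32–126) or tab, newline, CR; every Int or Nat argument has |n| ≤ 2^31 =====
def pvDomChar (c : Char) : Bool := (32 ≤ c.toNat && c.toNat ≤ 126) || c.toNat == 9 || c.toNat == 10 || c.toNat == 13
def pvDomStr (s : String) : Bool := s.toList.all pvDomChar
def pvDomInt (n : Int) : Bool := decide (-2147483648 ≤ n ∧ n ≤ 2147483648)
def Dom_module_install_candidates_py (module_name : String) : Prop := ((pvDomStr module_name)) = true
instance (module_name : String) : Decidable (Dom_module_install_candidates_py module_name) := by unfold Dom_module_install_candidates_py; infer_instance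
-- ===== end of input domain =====

-- B computes the four candidate values up front and selects first occurrences recursively
-- (take the head, filter its later copies out of the tail, recurse) instead of A's four
-- interleaved compute/membership-check/append blocks. Objective: alternative decomposition.

-- MODULE_PACKAGE_MAP (shared module-level constant)
def pvModulePackageMap : PySem.Dict String String := PySem.Dict.ofList [
  ("discord", "discord.py[voice]"),
  ("cv2", "opencv-python"),
  ("PIL", "Pillow"),
  ("yaml", "PyYAML"),
  ("dotenv", "python-dotenv"),
  ("bs4", "beautifulsoup4"),
  ("sklearn", "scikit-learn"),
  ("Crypto", "pycryptodome"),
  ("OpenSSL", "pyopenssl"),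
  ("dateutil", "python-dateutil"),
  ("google.generativeai", "google-generativeai"),
  ("google.genai", "google-genai"),
  ("aiohttp", "aiohttp"),
  ("requests", "requests")]

-- ===== PORT A =====
def module_install_candidates_py (module_name : String) : List String :=
  -- root = module_name.split(".", 1)[0]  (split with a nonempty separator is never empty, so [0] is total)
  let root := (((PySem.Str.splitMax? module_name "." 1).getD []).headD "")
  -- for key in (module_name, root): mapped = MODULE_PACKAGE_MAP.get(key); if mapped and mapped not in candidates: append
  let candidates : List String :=
    [module_name, root].foldl (fun candidates key =>
      match PySem.Dict.get? pvModulePackageMap key with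
      | some mapped => if mapped != "" && !candidates.contains mapped then candidates ++ [mapped] else candidates
      | none => candidates) []
  let fallback_root := PySem.Str.lower (PySem.Str.replace root "_" "-")
  let candidates :=
    if fallback_root != "" && !candidates.contains fallback_root then candidates ++ [fallback_root] else candidates
  let fallback_full := PySem.Str.lower (PySem.Str.replace (PySem.Str.replace module_name "_" "-") "." "-")
  let candidates :=
    if fallback_full != "" && !candidates.contains fallback_full then candidates ++ [fallback_full] else candidates
  candidates

-- ===== PORT B =====
-- _first_distinct: take the head (skipping falsy None/""), filter its copies out of the tail, recurse
def pvFirstDistinct : List (Option String) → List String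
  | [] => []
  | h :: t =>
    match h with
    | none => pvFirstDistinct t
    | some s =>
      if s == "" then pvFirstDistinct t
      else s :: pvFirstDistinct (t.filter (fun v => v != some s))
termination_by l => l.length
decreasing_by
  all_goals simp
  all_goals exact List.length_filter_le _ t

def module_install_candidates_py_alt (module_name : String) : List String :=
  let root := (((PySem.Str.splitMax? module_name "." 1).getD []).headD "")
  let raw : List (Option String) := [
    PySem.Dict.get? pvModulePackageMap module_name,
    PySem.Dict.get? pvModulePackageMap root,
    some (PySem.Str.lower (PySem.Str.replace root "_" "-")),
    some (PySem.Str.lower (PySem.Str.replace (PySem.Str.replace module_name "_" "-") "." "-"))]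
  pvFirstDistinct raw

-- ===== PRECONDITION & SPEC =====
def Spec_module_install_candidates_py (module_name : String) (out : List String) : Prop := out = module_install_candidates_py_alt module_name
instance (module_name : String) (out : List String) : Decidable (Spec_module_install_candidates_py module_name out) := by unfold Spec_module_install_candidates_py; infer_instance

-- ===== CLAIM (what is proved, stated in full; the proofs are below) =====
def Claim_equal_module_install_candidates_py : Prop := ∀ (module_name : String), Dom_module_install_candidates_py module_name → Spec_module_install_candidates_py module_name (module_install_candidates_py module_name)

-- ===== LEMMAS AND PROOFS =====

-- A's interleaved check/append step over an optional candidate, generalized to an accumulator.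
def pvStep (acc : List String) (o : Option String) : List String :=
  match o with
  | some s => if s != "" && !acc.contains s then acc ++ [s] else acc
  | none => acc

-- "candidate not already in acc" (None is kept: A ignores it, pvFirstDistinct skips it)
def pvKeep (acc : List String) (o : Option String) : Bool :=
  match o with
  | some s => !acc.contains s
  | none => true

theorem pvKeep_nil (o : Option String) : pvKeep [] o = true := by
  cases o <;> rfl

theorem pv_filter_keep_nil (l : List (Option String)) : l.filter (pvKeep []) = l := by
  simp [List.filter_eq_self, pvKeep_nil]

theorem pvKeep_append_singleton (acc : List String) (s : String) (o : Option String) :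
    pvKeep (acc ++ [s]) o = (pvKeep acc o && (o != some s)) := by
  cases o with
  | none => rfl
  | some v =>
    by_cases hv : v = s
    · subst hv; simp [pvKeep]
    · simp [pvKeep, hv]

theorem pv_filter_keep_append (t : List (Option String)) (acc : List String) (s : String) :
    t.filter (pvKeep (acc ++ [s]))
      = (t.filter (pvKeep acc)).filter (fun v => v != some s) := by
  rw [List.filter_filter]
  apply List.filter_congr
  intro o _
  rw [pvKeep_append_singleton]
  cases pvKeep acc o <;> simp

-- The accumulator fold equals: acc, then recursive first-distinct selection of the
-- candidates not already in acc.
theorem pv_fold_eq_firstDistinct (os : List (Option String)) (acc : List String) :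
    os.foldl pvStep acc = acc ++ pvFirstDistinct (os.filter (pvKeep acc)) := by
  induction os generalizing acc with
  | nil => simp [pvFirstDistinct]
  | cons o t ih =>
    cases o with
    | none =>
      simp only [List.foldl_cons, List.filter_cons, pvStep, pvKeep, if_pos]
      rw [ih acc]
      simp [pvFirstDistinct]
    | some s =>
      by_cases hs : s = ""
      · subst hs
        simp only [List.foldl_cons, List.filter_cons, pvStep, pvKeep,
          bne_self_eq_false, Bool.false_and, Bool.false_eq_true, if_false]
        by_cases hc : acc.contains ""
        · simp only [hc, Bool.not_true, Bool.false_eq_true, if_false]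
          exact ih acc
        · simp only [hc, Bool.not_false, if_true]
          rw [ih acc, pvFirstDistinct]
          simp
      · by_cases hc : acc.contains s
        · simp only [List.foldl_cons, List.filter_cons, pvStep, pvKeep, hc,
            Bool.not_true, Bool.and_false, Bool.false_eq_true, if_false]
          exact ih acc
        · have hsne : (s != "") = true := by simp [hs]
          simp only [List.foldl_cons, List.filter_cons, pvStep, pvKeep, hc, hsne,
            Bool.not_false, Bool.and_self, if_true]
          rw [ih (acc ++ [s]), pv_filter_keep_append, pvFirstDistinct]
          simp [hs]

-- A's literal port is the pvStep fold over the four candidates.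
theorem pvA_eq_fold (m : String) :
    module_install_candidates_py m
      = ([PySem.Dict.get? pvModulePackageMap m,
          PySem.Dict.get? pvModulePackageMap (((PySem.Str.splitMax? m "." 1).getD []).headD ""),
          some (PySem.Str.lower (PySem.Str.replace (((PySem.Str.splitMax? m "." 1).getD []).headD "") "_" "-")),
          some (PySem.Str.lower (PySem.Str.replace (PySem.Str.replace m "_" "-") "." "-"))]
         : List (Option String)).foldl pvStep [] := by
  unfold module_install_candidates_py
  simp only [List.foldl_cons, List.foldl_nil, pvStep.eq_def]

-- ===== VERDICT (by name: the statement is the Claim_ definition above) =====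
theorem module_install_candidates_py_spec : Claim_equal_module_install_candidates_py := by
  intro module_name _
  unfold Spec_module_install_candidates_py
  rw [pvA_eq_fold, pv_fold_eq_firstDistinct, pv_filter_keep_nil]
  rfl
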